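-- pv_equiv track=rewrite | github.com/drather/PS | exercise/programmers/Programmers_구현_신고결과받기.py | solution
-- ===== SOURCE A (Python) =====
-- from typing import List
--
-- def solution(id_list: List, report: List[str], k: int):
--     length = len(id_list)
--
--     table = {}
--     report = set(report)
--
--     for id_ in id_list:
--         table[id_] = {
--             "in": [],
--             "out": [],
--             "notified_count": 0
--         }
--
--     for r in report:
--         src, trg = r.split()
--
--         table[src]["out"].append(trg)
--         table[trg]["in"].append(src)
--
--     for key, value in table.items():
--         if len(table[key]["in"]) >= k:
--             for in_user in table[key]["in"]:
--                 table[in_user]["notified_count"] += 1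
--
--     answer = [value["notified_count"] for _, value in table.items()]
--     return answer
-- ===== SOURCE B (Python) =====
-- from typing import List
--
-- def solution(id_list: List, report: List[str], k: int):
--     pairs = [r.split() for r in set(report)]
--     targets = [t for _, t in pairs]
--     cnt = {}
--     for t in targets:
--         cnt[t] = cnt.get(t, 0) + 1
--     banned = {t for _, t in pairs if cnt[t] >= k}
--     notified = {id_: 0 for id_ in id_list}
--     for src, trg in pairs:
--         if trg in banned:
--             notified[src] += 1
--     return [notified[id_] for id_ in id_list]
-- ===== Notes on version B (the rewrite author's own statement) =====
-- stated objective: simpler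
-- what changed: B drops A's per-user in/out adjacency lists and its users-then-in-lists double loop: it makes one counting pass over the deduplicated reports (reports per target), builds the banned set, and then credits each deduped report's reporter directly.
-- outside the precondition, e.g. on solution(['a', 'a'], [], 1): A returns [0], B returns [0, 0]
import Mathlib
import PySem

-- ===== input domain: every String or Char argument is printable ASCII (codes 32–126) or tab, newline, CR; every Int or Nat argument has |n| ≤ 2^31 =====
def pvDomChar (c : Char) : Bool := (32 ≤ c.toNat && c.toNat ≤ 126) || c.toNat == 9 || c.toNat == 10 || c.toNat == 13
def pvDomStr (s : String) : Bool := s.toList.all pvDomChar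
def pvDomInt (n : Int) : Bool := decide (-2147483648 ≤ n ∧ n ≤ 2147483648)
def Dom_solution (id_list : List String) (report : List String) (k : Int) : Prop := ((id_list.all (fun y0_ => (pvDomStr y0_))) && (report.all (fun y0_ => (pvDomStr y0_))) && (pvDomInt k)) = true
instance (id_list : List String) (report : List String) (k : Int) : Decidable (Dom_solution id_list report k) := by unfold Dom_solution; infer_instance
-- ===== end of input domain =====

-- B replaces A's per-user in/out adjacency lists by one counting pass over the deduplicated
-- reports (objective: simpler). Equality is about the return value; neither program observably
-- mutates its arguments (A only rebinds its local name `report`).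

-- ===== PORT A =====
-- A-side helpers: one definition per loop body of Source A.
-- 'table[id_] = {"in": [], "out": [], "notified_count": 0}' — entry ported as (in, out, notified_count)
def pvAInit (t : PySem.Dict String (List String × List String × Int)) (id_ : String) :
    PySem.Dict String (List String × List String × Int) :=
  t.insert id_ ([], [], 0)

-- 'src, trg = r.split(); table[src]["out"].append(trg); table[trg]["in"].append(src)'
-- (a line that is not exactly two words raises ValueError in Python, a word absent from
-- id_list raises KeyError: both are excluded by Pre_solution, the fallback branch is unreachable)
def pvAReport (t : PySem.Dict String (List String × List String × Int)) (r : String) :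
    PySem.Dict String (List String × List String × Int) :=
  match PySem.Str.split₀ r with
  | [src, trg] =>
      let t1 := t.modify src ([], [], 0) (fun e => (e.1, e.2.1 ++ [trg], e.2.2))
      t1.modify trg ([], [], 0) (fun e => (e.1 ++ [src], e.2.1, e.2.2))
  | _ => t

-- inner loop 'for in_user in table[key]["in"]: table[in_user]["notified_count"] += 1'
def pvABump (t : PySem.Dict String (List String × List String × Int)) (in_user : String) :
    PySem.Dict String (List String × List String × Int) :=
  t.modify in_user ([], [], 0) (fun e => (e.1, e.2.1, e.2.2 + 1))

-- 'if len(table[key]["in"]) >= k: …'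
def pvANotify (k : Int) (t : PySem.Dict String (List String × List String × Int)) (key : String) :
    PySem.Dict String (List String × List String × Int) :=
  if k ≤ (((t.getD key ([], [], 0)).1.length : Int)) then
    (t.getD key ([], [], 0)).1.foldl pvABump t
  else t

def solution (id_list : List String) (report : List String) (k : Int) : List Int :=
  let _length : Int := (id_list.length : Int)
  let table := id_list.foldl pvAInit PySem.Dict.empty
  let rep : PySem.Set String := PySem.Set.ofList report
  let table := rep.foldl pvAReport table
  let table := table.keys.foldl (pvANotify k) table
  table.values.map (fun value => value.2.2)

-- ===== PORT B =====
-- 'r.split()' into a (reporter, target) pair; Python raises ValueError on a line that is not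
-- exactly two words (excluded by Pre_solution), so the ("", "") branch is unreachable there.
def pvSplitPair (r : String) : String × String :=
  match PySem.Str.split₀ r with
  | [src, trg] => (src, trg)
  | _ => ("", "")

def solution_alt (id_list : List String) (report : List String) (k : Int) : List Int :=
  let pairs := (PySem.Set.ofList report).map pvSplitPair
  let targets := pairs.map (fun p => p.2)
  let cnt : PySem.Dict String Int :=
    targets.foldl (fun d t => d.insert t (d.getD t 0 + 1)) PySem.Dict.empty
  let banned : PySem.Set String :=
    PySem.Set.ofList ((pairs.filter (fun p => k ≤ cnt.getD p.2 0)).map (fun p => p.2))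
  let notified0 : PySem.Dict String Int :=
    id_list.foldl (fun d id_ => d.insert id_ 0) PySem.Dict.empty
  let notified := pairs.foldl
    (fun d p => if PySem.Set.contains banned p.2 then d.modify p.1 0 (fun n => n + 1) else d)
    notified0
  id_list.map (fun id_ => notified.getD id_ 0)

-- ===== PRECONDITION & SPEC =====
-- Pre_ excludes (a) id_lists with duplicate ids, where A's answer follows the deduplicating dict
-- (one entry per distinct id — an accident of dict keys, as defensible as B's one entry per
-- position), and (b) report lines that do not split into exactly two words of id_list, on which
-- A raises ValueError/KeyError.
def Pre_solution (id_list : List String) (report : List String) (k : Int) : Prop :=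
  id_list.Nodup ∧
    ∀ r ∈ report, (PySem.Str.split₀ r).length = 2 ∧ ∀ x ∈ PySem.Str.split₀ r, x ∈ id_list
instance (id_list : List String) (report : List String) (k : Int) :
    Decidable (Pre_solution id_list report k) := by unfold Pre_solution; infer_instance

def pvWitness_solution : List String × List String × Int :=
  (["muzi", "frodo", "apeach"], ["muzi frodo", "apeach frodo", "muzi frodo"], 2)

def Spec_solution (id_list : List String) (report : List String) (k : Int) (out : List Int) : Prop := out = solution_alt id_list report k
instance (id_list : List String) (report : List String) (k : Int) (out : List Int) : Decidable (Spec_solution id_list report k out) := by unfold Spec_solution; infer_instance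

-- ===== CLAIM (what is proved, stated in full; the proofs are below) =====
def Claim_equal_solution : Prop := ∀ (id_list : List String) (report : List String) (k : Int), Dom_solution id_list report k → Pre_solution id_list report k → Spec_solution id_list report k (solution id_list report k)

-- ===== LEMMAS AND PROOFS =====

-- the deduplicated reports as (reporter, target) pairs
def pvPairs (report : List String) : List (String × String) :=
  (PySem.Set.ofList report).map pvSplitPair

-- the "in" list A builds for a given target key
def pvIn (report : List String) (key : String) : List String :=
  ((pvPairs report).filter (fun p => p.2 == key)).map (fun p => p.1)

-- the common value both programs compute for user i
def pvVal (P : List (String × String)) (k : Int) (i : String) : Int :=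
  (P.countP (fun p => p.1 == i && decide (k ≤ ((P.countP (fun q => q.2 == p.2) : Nat) : Int))) : Int)

-- ---- getD/keys lemmas for the folds ----

lemma pvA_init_getD (l : List String)
    (d : PySem.Dict String (List String × List String × Int)) (v : String) :
    (l.foldl pvAInit d).getD v ([], [], 0)
      = if v ∈ l then ([], [], 0) else d.getD v ([], [], 0) := by
  induction l generalizing d with
  | nil => simp
  | cons x l ih =>
      simp only [List.foldl_cons, ih, pvAInit, PySem.Dict.getD_insert, List.mem_cons]
      by_cases hv : v = x <;> simp [hv]

lemma pvB_init_getD (l : List String) (d : PySem.Dict String Int) (v : String) :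
    (l.foldl (fun d id_ => d.insert id_ (0 : Int)) d).getD v 0
      = if v ∈ l then 0 else d.getD v 0 := by
  induction l generalizing d with
  | nil => simp
  | cons x l ih =>
      simp only [List.foldl_cons, ih, PySem.Dict.getD_insert, List.mem_cons]
      by_cases hv : v = x <;> simp [hv]

def pvStep2 (t : PySem.Dict String (List String × List String × Int)) (p : String × String) :
    PySem.Dict String (List String × List String × Int) :=
  (t.modify p.1 ([], [], 0) (fun e => (e.1, e.2.1 ++ [p.2], e.2.2))).modify
    p.2 ([], [], 0) (fun e => (e.1 ++ [p.1], e.2.1, e.2.2))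

lemma pvA_report_fold_eq (rep : List String)
    (d : PySem.Dict String (List String × List String × Int))
    (h : ∀ r ∈ rep, (PySem.Str.split₀ r).length = 2) :
    rep.foldl pvAReport d = (rep.map pvSplitPair).foldl pvStep2 d := by
  rw [List.foldl_map]
  apply PySem.List.foldl_congr_mem
  intro acc r hr
  have h2 := h r hr
  unfold pvAReport pvSplitPair pvStep2
  rcases hs : PySem.Str.split₀ r with _ | ⟨a, _ | ⟨b, _ | _⟩⟩ <;> simp_all

lemma pvStep2_getD (l : List (String × String))
    (d : PySem.Dict String (List String × List String × Int)) (key : String) :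
    (l.foldl pvStep2 d).getD key ([], [], 0)
      = ((d.getD key ([], [], 0)).1 ++ (l.filter (fun p => p.2 == key)).map (fun p => p.1),
         (d.getD key ([], [], 0)).2.1 ++ (l.filter (fun p => p.1 == key)).map (fun p => p.2),
         (d.getD key ([], [], 0)).2.2) := by
  induction l generalizing d with
  | nil => simp
  | cons p l ih =>
      simp only [List.foldl_cons, ih, pvStep2, PySem.Dict.getD_modify, List.filter_cons]
      by_cases h2 : key = p.2 <;> by_cases h1 : key = p.1
      · subst h1; simp [← h2, List.append_assoc]
      · subst h2; simp [h1, Ne.symm h1, List.append_assoc]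
      · subst h1; simp [h2, Ne.symm h2, List.append_assoc]
      · simp [h1, h2, Ne.symm h1, Ne.symm h2]

lemma pvABump_getD (l : List String)
    (t : PySem.Dict String (List String × List String × Int)) (key : String) :
    (l.foldl pvABump t).getD key ([], [], 0)
      = ((t.getD key ([], [], 0)).1, (t.getD key ([], [], 0)).2.1,
         (t.getD key ([], [], 0)).2.2 + (l.count key : Int)) := by
  induction l generalizing t with
  | nil => simp
  | cons x l ih =>
      simp only [List.foldl_cons, ih, pvABump, PySem.Dict.getD_modify, List.count_cons]
      by_cases hx : key = x
      · subst hx; simp; ring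
      · simp [hx, Ne.symm hx]

lemma pvSet_update_of_subset (s : PySem.Set String) (l : List String)
    (h : ∀ x ∈ l, x ∈ s) : PySem.Set.update s l = s := by
  induction l generalizing s with
  | nil => rfl
  | cons x l ih =>
      have hx : PySem.Set.add s x = s := PySem.Set.add_of_mem (h x (by simp))
      show (x :: l).foldl PySem.Set.add s = s
      simp only [List.foldl_cons, hx]
      exact ih s (fun y hy => h y (by simp [hy]))

lemma pv_keys_modify (d : PySem.Dict String (List String × List String × Int)) (x : String)
    (f : (List String × List String × Int) → (List String × List String × Int)) :
    (d.modify x ([], [], 0) f).keys = PySem.Set.add d.keys x := by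
  have h := PySem.Dict.keys_foldl_modify (κ := String) [x] ([], [], 0) (fun _ _ => f) d
  simpa [PySem.Set.update] using h

lemma pvStep2_keys (l : List (String × String))
    (d : PySem.Dict String (List String × List String × Int))
    (h : ∀ p ∈ l, p.1 ∈ d.keys ∧ p.2 ∈ d.keys) :
    (l.foldl pvStep2 d).keys = d.keys := by
  induction l generalizing d with
  | nil => rfl
  | cons p l ih =>
      have hk : (pvStep2 d p).keys = d.keys := by
        unfold pvStep2
        rw [pv_keys_modify, pv_keys_modify]
        rw [PySem.Set.add_of_mem (h p (by simp)).1, PySem.Set.add_of_mem (h p (by simp)).2]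
      simp only [List.foldl_cons]
      rw [ih (pvStep2 d p) (by rw [hk]; exact fun q hq => h q (by simp [hq])), hk]

lemma pvABump_keys (l : List String)
    (t : PySem.Dict String (List String × List String × Int))
    (h : ∀ x ∈ l, x ∈ t.keys) : (l.foldl pvABump t).keys = t.keys := by
  have heq : (l.foldl pvABump t).keys = PySem.Set.update t.keys l :=
    PySem.Dict.keys_foldl_modify (κ := String) l ([], [], 0)
      (fun _ _ => (fun e => (e.1, e.2.1, e.2.2 + 1))) t
  rw [heq]; exact pvSet_update_of_subset _ _ h

lemma pvANotify_fold (k : Int) (F : String → List String) (ks : List String)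
    (t : PySem.Dict String (List String × List String × Int))
    (hF : ∀ key, (t.getD key ([], [], 0)).1 = F key)
    (hsub : ∀ key, ∀ u ∈ F key, u ∈ t.keys) :
    (∀ i, ((ks.foldl (pvANotify k) t).getD i ([], [], 0)).2.2
      = (t.getD i ([], [], 0)).2.2
        + (ks.map (fun key =>
            if k ≤ ((F key).length : Int) then ((F key).count i : Int) else 0)).sum) ∧
    (ks.foldl (pvANotify k) t).keys = t.keys := by
  induction ks generalizing t with
  | nil => simp
  | cons key ks ih =>
      by_cases hc : k ≤ ((F key).length : Int)
      · have ht' : List.foldl (pvANotify k) t (key :: ks)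
            = List.foldl (pvANotify k) ((F key).foldl pvABump t) ks := by
          simp only [List.foldl_cons, pvANotify, hF key, hc, if_pos]
        have hgd : ∀ i, ((F key).foldl pvABump t).getD i ([], [], 0)
            = ((t.getD i ([], [], 0)).1, (t.getD i ([], [], 0)).2.1,
               (t.getD i ([], [], 0)).2.2 + (((F key).count i : Nat) : Int)) :=
          fun i => pvABump_getD (F key) t i
        have hkeys : ((F key).foldl pvABump t).keys = t.keys :=
          pvABump_keys _ _ (fun x hx => hsub key x hx)
        obtain ⟨ihv, ihk⟩ := ih ((F key).foldl pvABump t)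
          (fun key' => by rw [hgd key']; exact hF key')
          (fun key' u hu => by rw [hkeys]; exact hsub key' u hu)
        constructor
        · intro i
          rw [ht', ihv i, hgd i]
          simp [hc]
          ring
        · rw [ht', ihk, hkeys]
      · have ht' : List.foldl (pvANotify k) t (key :: ks) = List.foldl (pvANotify k) t ks := by
          simp only [List.foldl_cons, pvANotify, hF key, hc, if_neg, not_false_iff]
        obtain ⟨ihv, ihk⟩ := ih t hF hsub
        constructor
        · intro i
          rw [ht', ihv i]
          simp [hc]
        · rw [ht', ihk]

-- ---- counting lemmas ----

lemma pv_sum_partition (l : List String) (hl : l.Nodup) (xs : List (String × String))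
    (Q : String × String → Bool) (hx : ∀ p ∈ xs, p.2 ∈ l) :
    (l.map (fun key => (xs.countP (fun p => p.2 == key && Q p) : Int))).sum
      = (xs.countP Q : Int) := by
  induction xs with
  | nil => simp
  | cons p xs ih =>
      have hx' : ∀ q ∈ xs, q.2 ∈ l := fun q hq => hx q (by simp [hq])
      have hxp : p.2 ∈ l := hx p (by simp)
      simp only [List.countP_cons]
      have hmap : (fun key => ((List.countP (fun q => q.2 == key && Q q) xs
              + if p.2 == key && Q p then 1 else 0 : Nat) : Int))
          = fun key => ((List.countP (fun q => q.2 == key && Q q) xs : Int)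
              + if p.2 == key && Q p then (1 : Int) else 0) := by
        funext key; push_cast; split_ifs <;> simp
      rw [hmap, PySem.List.sum_map_add_int, ih hx']
      by_cases hq : Q p = true
      · have h1 : (List.map (fun key => if p.2 == key && Q p then (1 : Int) else 0) l)
            = List.map (fun key => if p.2 == key then (1 : Int) else 0) l := by simp [hq]
        rw [h1, PySem.List.sum_map_ite_one_zero]
        have h2 : l.countP (fun key => p.2 == key) = l.count p.2 := by
          rw [List.count]; apply List.countP_congr; intro a _
          by_cases h : p.2 = a
          · simp [h]
          · simp [h, Ne.symm h]
        rw [h2, List.count_eq_one_of_mem hl hxp]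
        simp [hq]
      · simp [hq]

lemma pv_key_term (P : List (String × String)) (k : Int) (i key : String) :
    (if k ≤ ((P.countP (fun p => p.2 == key) : Nat) : Int)
       then (P.countP (fun p => p.1 == i && p.2 == key) : Int) else 0)
      = (P.countP (fun p =>
          p.2 == key && (p.1 == i
            && decide (k ≤ ((P.countP (fun q => q.2 == p.2) : Nat) : Int)))) : Int) := by
  by_cases hc : k ≤ ((P.countP (fun p => p.2 == key) : Nat) : Int)
  · rw [if_pos hc]
    congr 1
    apply List.countP_congr
    intro p _
    by_cases h2 : p.2 = key
    · simp [h2, hc, Bool.and_comm]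
    · simp [h2]
  · rw [if_neg hc]
    symm
    norm_cast
    rw [List.countP_eq_zero]
    intro p hp
    by_cases h2 : p.2 = key
    · simp [h2, hc]
    · simp [h2]

lemma pvPairs_mem (id_list report : List String) (k : Int)
    (hpre : Pre_solution id_list report k) :
    ∀ p ∈ pvPairs report, p.1 ∈ id_list ∧ p.2 ∈ id_list := by
  rintro ⟨a, b⟩ hp
  simp only [pvPairs, List.mem_map, PySem.Set.mem_ofList] at hp
  obtain ⟨r, hr, hsplit⟩ := hp
  obtain ⟨hlen, hmem⟩ := hpre.2 r hr
  unfold pvSplitPair at hsplit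
  rcases hs : PySem.Str.split₀ r with _ | ⟨x, _ | ⟨y, _ | _⟩⟩ <;> simp_all

-- ---- the two programs compute pvVal ----

lemma pvB_eq_val (id_list report : List String) (k : Int) :
    solution_alt id_list report k
      = id_list.map (fun i => pvVal (pvPairs report) k i) := by
  simp only [solution_alt]
  rw [show List.map pvSplitPair (PySem.Set.ofList report) = pvPairs report from rfl]
  set P := pvPairs report with hP
  set tg := P.map (fun p => p.2) with htg
  set cnt : PySem.Dict String Int := List.foldl (fun d t => d.insert t (d.getD t 0 + 1)) PySem.Dict.empty tg with hcnt
  set n0 : PySem.Dict String Int := List.foldl (fun d id_ => d.insert id_ (0 : Int)) PySem.Dict.empty id_list with hn0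
  have hcntv : ∀ x, cnt.getD x 0 = ((tg.count x : Nat) : Int) := by
    intro x; rw [hcnt, PySem.Dict.getD_foldl_insert_add_one]; simp
  set banned := PySem.Set.ofList
    ((P.filter (fun p => decide (k ≤ cnt.getD p.2 0))).map (fun p => p.2)) with hband
  have hban : ∀ p ∈ P, banned.contains p.2 = decide (k ≤ ((tg.count p.2 : Nat) : Int)) := by
    intro p hp
    by_cases hc : k ≤ ((tg.count p.2 : Nat) : Int)
    · have hmem : p.2 ∈ banned := by
        rw [hband, PySem.Set.mem_ofList]
        exact List.mem_map.mpr ⟨p, List.mem_filter.mpr ⟨hp, by simp [hcntv, hc]⟩, rfl⟩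
      rw [decide_eq_true hc]
      exact (PySem.Set.contains_iff _ _).mpr hmem
    · have hmem : p.2 ∉ banned := by
        rw [hband, PySem.Set.mem_ofList]
        intro hmem
        obtain ⟨q, hq, hq2⟩ := List.mem_map.mp hmem
        obtain ⟨hqP, hqc⟩ := List.mem_filter.mp hq
        rw [hcntv] at hqc
        exact hc (by simpa [hq2] using of_decide_eq_true hqc)
      have hcf : banned.contains p.2 = false := by
        rw [← Bool.not_eq_true]
        exact fun h => hmem ((PySem.Set.contains_iff _ _).mp h)
      rw [hcf, decide_eq_false hc]
  have hfold : P.foldl (fun d p =>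
        if banned.contains p.2 then d.modify p.1 0 (fun n => n + 1) else d) n0
      = ((P.filter (fun p => decide (k ≤ ((tg.count p.2 : Nat) : Int)))).map
          (fun p => p.1)).foldl (fun d x => d.modify x 0 (fun n => n + 1)) n0 := by
    rw [PySem.List.foldl_congr_mem P _
      (fun d p => if decide (k ≤ ((tg.count p.2 : Nat) : Int))
        then d.modify p.1 0 (fun n => n + 1) else d) n0
      (fun acc p hp => by rw [hban p hp])]
    rw [PySem.List.foldl_if_eq_foldl_filter]
    rw [List.foldl_map]
  rw [hfold]
  apply List.map_congr_left
  intro i _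
  rw [PySem.Dict.getD_foldl_modify_add_one]
  have hz : n0.getD i 0 = 0 := by rw [hn0, pvB_init_getD]; simp
  rw [hz, zero_add]
  simp only [pvVal]
  rw [List.count, List.countP_map, List.countP_filter]
  congr 1
  apply List.countP_congr
  intro p _
  have hcount : tg.count p.2 = P.countP (fun q => q.2 == p.2) := by
    rw [htg, List.count, List.countP_map]
    rfl
  rw [hcount]
  rfl

lemma pvA_eq_val (id_list report : List String) (k : Int)
    (hpre : Pre_solution id_list report k) :
    solution id_list report k
      = id_list.map (fun i => pvVal (pvPairs report) k i) := by
  obtain ⟨hnd, hrep⟩ := hpre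
  simp only [solution]
  set table0 := List.foldl pvAInit PySem.Dict.empty id_list with h0d
  have h0 : ∀ v, table0.getD v ([], [], 0) = ([], [], 0) := by
    intro v; rw [h0d, pvA_init_getD]; split_ifs <;> simp
  have hkeys0 : table0.keys = id_list := by
    rw [h0d]
    have h := PySem.Dict.keys_foldl_insert (κ := String) id_list
      (fun _ _ => (([], [], 0) : List String × List String × Int)) PySem.Dict.empty
    calc (List.foldl pvAInit PySem.Dict.empty id_list).keys
        = PySem.Set.update PySem.Dict.empty.keys id_list := h
      _ = PySem.Set.ofList id_list := rfl
      _ = id_list := PySem.Set.ofList_eq_self_of_nodup id_list hnd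
  have hfold2 : List.foldl pvAReport table0 (PySem.Set.ofList report)
      = List.foldl pvStep2 table0 (pvPairs report) := by
    rw [pvA_report_fold_eq _ _ (fun r hr => (hrep r ((PySem.Set.mem_ofList _ _).mp hr)).1)]
    rfl
  rw [hfold2]
  set table1 := List.foldl pvStep2 table0 (pvPairs report) with h1d
  have h1 : ∀ key, table1.getD key ([], [], 0)
      = (pvIn report key,
         ((pvPairs report).filter (fun p => p.1 == key)).map (fun p => p.2), 0) := by
    intro key
    rw [h1d, pvStep2_getD, h0 key]
    simp [pvIn]
  have hmemP : ∀ p ∈ pvPairs report, p.1 ∈ id_list ∧ p.2 ∈ id_list :=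
    pvPairs_mem id_list report k ⟨hnd, hrep⟩
  have hkeys1 : table1.keys = id_list := by
    rw [h1d, pvStep2_keys]
    · exact hkeys0
    · intro p hp
      rw [hkeys0]
      exact hmemP p hp
  obtain ⟨hv, hk2⟩ := pvANotify_fold k (pvIn report) table1.keys table1
    (fun key => by rw [h1 key])
    (fun key u hu => by
      rw [hkeys1]
      simp only [pvIn, List.mem_map, List.mem_filter] at hu
      obtain ⟨p, ⟨hpP, _⟩, rfl⟩ := hu
      exact (hmemP p hpP).1)
  set table2 := List.foldl (pvANotify k) table1 table1.keys with h2d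
  have hnd2 : table2.keys.Nodup := by rw [hk2, hkeys1]; exact hnd
  have hvals : table2.values = table2.keys.map (fun key => table2.getD key ([], [], 0)) :=
    PySem.Dict.values_eq_map_keys table2 hnd2 _
  rw [hvals, hk2, hkeys1, List.map_map]
  apply List.map_congr_left
  intro i _
  show (table2.getD i ([], [], 0)).2.2 = pvVal (pvPairs report) k i
  rw [hv i, h1 i, hkeys1]
  simp only [zero_add]
  have hterm : ∀ key,
      (if k ≤ ((pvIn report key).length : Int) then ((pvIn report key).count i : Int) else 0)
        = ((pvPairs report).countP (fun p => p.2 == key && (p.1 == i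
            && decide (k ≤ (((pvPairs report).countP (fun q => q.2 == p.2) : Nat) : Int)))) : Int) := by
    intro key
    have hlen : (pvIn report key).length = (pvPairs report).countP (fun p => p.2 == key) := by
      rw [pvIn, List.length_map, ← List.countP_eq_length_filter]
    have hcnt2 : (pvIn report key).count i
        = (pvPairs report).countP (fun p => p.1 == i && p.2 == key) := by
      rw [pvIn, List.count, List.countP_map, List.countP_filter]
      rfl
    rw [hlen, hcnt2, pv_key_term]
  calc (id_list.map (fun key =>
        if k ≤ ((pvIn report key).length : Int) then ((pvIn report key).count i : Int) else 0)).sum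
      = (id_list.map (fun key => ((pvPairs report).countP (fun p => p.2 == key && (p.1 == i
            && decide (k ≤ (((pvPairs report).countP (fun q => q.2 == p.2) : Nat) : Int)))) : Int))).sum := by
        exact congrArg List.sum (List.map_congr_left (fun key _ => hterm key))
    _ = ((pvPairs report).countP (fun p => p.1 == i
            && decide (k ≤ (((pvPairs report).countP (fun q => q.2 == p.2) : Nat) : Int))) : Int) :=
        pv_sum_partition id_list hnd (pvPairs report) _ (fun p hp => (hmemP p hp).2)
    _ = pvVal (pvPairs report) k i := rfl

-- ===== VERDICT (by name: the statement is the Claim_ definition above) =====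
theorem solution_spec : Claim_equal_solution := by
  intro id_list report k _hdom hpre
  unfold Spec_solution
  rw [pvA_eq_val id_list report k hpre, pvB_eq_val id_list report k]
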